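-- pv_equiv track=rewrite | github.com/Jayanth-21/cloud_agent | agent/src/scoping/domains.py | infer_domain_from_message
-- ===== SOURCE A (Python) =====
-- from typing import Any, Literal
--
-- Domain = Literal["cost", "logs", "audit", "discovery", "all"]
--
-- def infer_domain_from_message(message: str) -> Domain:
--     """
--     Simple heuristic: infer which domain the user is asking about.
--     Returns "all" if unclear or mixed.
--     """
--     lower = (message or "").lower()
--     cost_keywords = ("cost", "spend", "billing", "budget", "forecast", "usage", "ce:")
--     logs_keywords = ("log", "metric", "alarm", "cloudwatch", "insight")
--     audit_keywords = ("cloudtrail", "audit", "event", "who did", "api call", "lake")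
--     discovery_keywords = (
--         "list log group", "log groups", "what services", "what do i have", "list lambda",
--         "list lambdas", "describe lambda", "ecs cluster", "ecs service", "list ecs",
--         "config", "discovery", "what's deployed", "resources in my account", "list resources",
--     )
--     has_cost = any(k in lower for k in cost_keywords)
--     has_logs = any(k in lower for k in logs_keywords)
--     has_audit = any(k in lower for k in audit_keywords)
--     has_discovery = any(k in lower for k in discovery_keywords)
--     if has_cost and not has_logs and not has_audit and not has_discovery:
--         return "cost"
--     if has_logs and not has_cost and not has_audit and not has_discovery:
--         return "logs"
--     if has_audit and not has_cost and not has_logs and not has_discovery: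
--         return "audit"
--     if has_discovery and not has_cost and not has_logs and not has_audit:
--         return "discovery"
--     return "all"
-- ===== SOURCE B (Python) =====
-- # One flat keyword->domain table and a conflict-detecting accumulator with early exit;
-- # no per-category booleans and no match list.
-- _KEYWORD_DOMAIN = {}
-- for _dom, _kws in (
--     ("cost", ("cost", "spend", "billing", "budget", "forecast", "usage", "ce:")),
--     ("logs", ("log", "metric", "alarm", "cloudwatch", "insight")),
--     ("audit", ("cloudtrail", "audit", "event", "who did", "api call", "lake")),
--     ("discovery", (
--         "list log group", "log groups", "what services", "what do i have", "list lambda",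
--         "list lambdas", "describe lambda", "ecs cluster", "ecs service", "list ecs",
--         "config", "discovery", "what's deployed", "resources in my account", "list resources",
--     )),
-- ):
--     for _kw in _kws:
--         _KEYWORD_DOMAIN[_kw] = _dom
--
--
-- def infer_domain_from_message(message: str):
--     lower = (message or "").lower()
--     found = None
--     for kw, dom in _KEYWORD_DOMAIN.items():
--         if kw in lower:
--             if found is None:
--                 found = dom
--             elif found != dom:
--                 return "all"  # keywords from two different domains -> mixed
--     return found if found is not None else "all"
-- ===== Notes on version B (the rewrite author's own statement) =====
-- stated objective: alternative
-- what changed: Replaces the four per-category booleans and mutually-exclusive if-branches with one flat keyword-to-domain map scanned once, maintaining a single accumulator that records the first matched domain and returns 'all' immediately on a keyword from a conflicting domain.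
import Mathlib
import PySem

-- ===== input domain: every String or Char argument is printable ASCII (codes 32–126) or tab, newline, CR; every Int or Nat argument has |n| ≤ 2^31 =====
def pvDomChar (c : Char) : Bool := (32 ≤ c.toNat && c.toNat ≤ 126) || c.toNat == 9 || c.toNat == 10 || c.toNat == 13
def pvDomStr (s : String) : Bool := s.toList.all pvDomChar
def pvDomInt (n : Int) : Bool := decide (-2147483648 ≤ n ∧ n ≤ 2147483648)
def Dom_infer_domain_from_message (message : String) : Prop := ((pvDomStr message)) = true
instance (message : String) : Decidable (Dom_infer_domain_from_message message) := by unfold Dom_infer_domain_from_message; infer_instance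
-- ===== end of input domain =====

-- B replaces the four per-category booleans and exclusive branches with one flat
-- keyword→domain table scanned once with a conflict-detecting accumulator (objective: alternative).

-- ===== PORT A =====
def pvCostKw : List String := ["cost", "spend", "billing", "budget", "forecast", "usage", "ce:"]
def pvLogsKw : List String := ["log", "metric", "alarm", "cloudwatch", "insight"]
def pvAuditKw : List String := ["cloudtrail", "audit", "event", "who did", "api call", "lake"]
def pvDiscoveryKw : List String :=
  ["list log group", "log groups", "what services", "what do i have", "list lambda",
   "list lambdas", "describe lambda", "ecs cluster", "ecs service", "list ecs",
   "config", "discovery", "what's deployed", "resources in my account", "list resources"]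

def pvKwHit (kws : List String) (lower : String) : Bool :=
  kws.any (fun k => PySem.Str.isIn k lower)

def infer_domain_from_message (message : String) : String :=
  let lower := PySem.Str.lower message  -- (message or "") = message for a string argument
  let has_cost := pvKwHit pvCostKw lower
  let has_logs := pvKwHit pvLogsKw lower
  let has_audit := pvKwHit pvAuditKw lower
  let has_discovery := pvKwHit pvDiscoveryKw lower
  if has_cost && !has_logs && !has_audit && !has_discovery then "cost"
  else if has_logs && !has_cost && !has_audit && !has_discovery then "logs"
  else if has_audit && !has_cost && !has_logs && !has_discovery then "audit"
  else if has_discovery && !has_cost && !has_logs && !has_audit then "discovery"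
  else "all"

-- ===== PORT B =====
-- the flat keyword→domain table (_KEYWORD_DOMAIN, insertion order)
def pvFlatKw : List (String × String) :=
  pvCostKw.map (fun k => (k, "cost")) ++ pvLogsKw.map (fun k => (k, "logs")) ++
  pvAuditKw.map (fun k => (k, "audit")) ++ pvDiscoveryKw.map (fun k => (k, "discovery"))

-- the for-loop over the table: accumulator `found`, early return "all" on conflict
def pvAltLoop (pairs : List (String × String)) (lower : String) (found : Option String) : String :=
  match pairs with
  | [] => match found with | none => "all" | some d => d
  | (kw, dom) :: rest =>
    if PySem.Str.isIn kw lower then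
      match found with
      | none => pvAltLoop rest lower (some dom)
      | some f => if f ≠ dom then "all" else pvAltLoop rest lower (some f)
    else pvAltLoop rest lower found

def infer_domain_from_message_alt (message : String) : String :=
  let lower := PySem.Str.lower message
  pvAltLoop pvFlatKw lower none

-- ===== PRECONDITION & SPEC =====
def Spec_infer_domain_from_message (message : String) (out : String) : Prop := out = infer_domain_from_message_alt message
instance (message : String) (out : String) : Decidable (Spec_infer_domain_from_message message out) := by unfold Spec_infer_domain_from_message; infer_instance

-- ===== CLAIM (what is proved, stated in full; the proofs are below) =====
def Claim_equal_infer_domain_from_message : Prop := ∀ (message : String), Dom_infer_domain_from_message message → Spec_infer_domain_from_message message (infer_domain_from_message message)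

-- ===== LEMMAS AND PROOFS =====

-- running the loop over one group's segment (all keywords mapped to the same domain d)
lemma pvAltLoop_seg (kws : List String) (d : String) (rest : List (String × String))
    (lower : String) (found : Option String) :
    pvAltLoop ((kws.map fun k => (k, d)) ++ rest) lower found =
      if pvKwHit kws lower then
        match found with
        | none => pvAltLoop rest lower (some d)
        | some f => if f ≠ d then "all" else pvAltLoop rest lower (some f)
      else pvAltLoop rest lower found := by
  induction kws generalizing found with
  | nil => simp [pvKwHit]
  | cons k ks ih =>
    have hk : pvKwHit (k :: ks) lower = (PySem.Str.isIn k lower || pvKwHit ks lower) := by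
      simp [pvKwHit]
    rw [List.map_cons, List.cons_append, hk]
    cases h : PySem.Str.isIn k lower with
    | false =>
      simp only [pvAltLoop, h, Bool.false_eq_true, if_false, Bool.false_or]
      cases found <;> exact ih _
    | true =>
      simp only [pvAltLoop, h, if_true, Bool.true_or]
      cases found with
      | none => rw [ih]; split_ifs <;> simp_all
      | some f =>
        by_cases hf : f = d
        · subst hf
          simp only [ne_eq, not_true_eq_false, if_false]
          rw [ih]; split_ifs <;> simp_all
        · simp [hf]

-- the final segment of the table (no trailing rest)
lemma pvAltLoop_seg_last (kws : List String) (d : String) (lower : String) (found : Option String) :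
    pvAltLoop (kws.map fun k => (k, d)) lower found =
      if pvKwHit kws lower then
        match found with
        | none => d
        | some f => if f ≠ d then "all" else f
      else match found with | none => "all" | some f => f := by
  have h := pvAltLoop_seg kws d [] lower found
  rw [List.append_nil] at h
  rw [h]
  cases found <;> split_ifs <;> simp_all [pvAltLoop]

lemma pv_key (message : String) :
    infer_domain_from_message message = infer_domain_from_message_alt message := by
  unfold infer_domain_from_message infer_domain_from_message_alt pvFlatKw
  rw [List.append_assoc, List.append_assoc]
  cases hc : pvKwHit pvCostKw (PySem.Str.lower message) <;>
  cases hl : pvKwHit pvLogsKw (PySem.Str.lower message) <;>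
  cases ha : pvKwHit pvAuditKw (PySem.Str.lower message) <;>
  cases hd : pvKwHit pvDiscoveryKw (PySem.Str.lower message) <;>
    simp [pvAltLoop_seg, pvAltLoop_seg_last, hc, hl, ha, hd]

-- ===== VERDICT (by name: the statement is the Claim_ definition above) =====
theorem infer_domain_from_message_spec : Claim_equal_infer_domain_from_message := by
  intro message _
  unfold Spec_infer_domain_from_message
  exact pv_key message
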